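-- pv_equiv track=rewrite | github.com/L-cloud/coding_test | BAEKJOON/16975.py | find
-- ===== SOURCE A (Python) =====
-- def find(index:int,left:int, right:int,target:int) -> int:
--     if target < left or right < target:
--         return 0
--     if left == right == target:
--         return index
--     l = find(index*2,left, (left + right) // 2, target)
--     r = find(index*2 + 1, (left + right) // 2 + 1, right, target)
--     return max(l,r)
-- ===== SOURCE B (Python) =====
-- def find(index: int, left: int, right: int, target: int) -> int:
--     # Two-phase: (1) compute the root-to-leaf path of the target as a list of
--     # direction bits using only interval arithmetic, (2) fold the bits onto the
--     # starting node index (child = parent*2 + bit).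
--     if target < left or right < target:
--         return 0
--     bits = []
--     while left != right:
--         mid = (left + right) // 2
--         if target <= mid:
--             bits.append(0)
--             right = mid
--         else:
--             bits.append(1)
--             left = mid + 1
--     for b in bits:
--         index = index * 2 + b
--     return index
-- ===== Notes on version B (the rewrite author's own statement) =====
-- stated objective: alternative
-- what changed: Replaces the double recursion combined with max by a two-phase computation: first build the target's root-to-leaf direction-bit path from the interval alone, then fold the bits onto the starting node index.
-- intended difference: On inputs with a negative start index and a non-degenerate interval containing the target, A's max(l,r) swallows the negative descended leaf index and returns 0, while B returns that leaf index, which is the value the descent is meant to compute. — e.g. on find(-1, 0, 1, 0): A returns 0, B returns -2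
import Mathlib
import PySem

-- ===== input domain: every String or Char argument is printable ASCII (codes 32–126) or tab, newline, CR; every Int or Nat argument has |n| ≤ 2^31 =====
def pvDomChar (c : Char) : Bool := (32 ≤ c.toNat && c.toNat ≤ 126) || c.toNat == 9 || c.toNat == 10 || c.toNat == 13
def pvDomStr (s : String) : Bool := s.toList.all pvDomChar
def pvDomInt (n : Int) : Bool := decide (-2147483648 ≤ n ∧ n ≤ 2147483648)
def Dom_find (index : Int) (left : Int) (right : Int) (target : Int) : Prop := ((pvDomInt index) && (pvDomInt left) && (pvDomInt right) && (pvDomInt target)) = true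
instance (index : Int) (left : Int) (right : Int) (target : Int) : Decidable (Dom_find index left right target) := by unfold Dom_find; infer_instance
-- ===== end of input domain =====

-- B replaces A's double recursion combined with max by a two-phase computation: build the
-- target's root-to-leaf direction-bit path from the interval alone, then fold the bits onto
-- the starting node index (alternative decomposition, same cost).
-- Both ports recurse on a fuel bound (interval length + 1), a pure totality guard: with that
-- much fuel the base fuel-0 case is never reached.

-- ===== PORT A =====
def findGo : Nat → Int → Int → Int → Int → Int
  | 0, _, _, _, _ => 0   -- unreachable with fuel = (right-left).toNat + 1
  | fuel + 1, index, left, right, target =>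
    if target < left ∨ right < target then 0
    else if left = right ∧ right = target then index
    else
      let l := findGo fuel (index * 2) left (PySem.Int.floordiv (left + right) 2) target
      let r := findGo fuel (index * 2 + 1) (PySem.Int.floordiv (left + right) 2 + 1) right target
      max l r

def find (index : Int) (left : Int) (right : Int) (target : Int) : Int :=
  findGo ((right - left).toNat + 1) index left right target

-- ===== PORT B =====
-- phase 1 of Source B: the while-loop collecting direction bits (0 = go left, 1 = go right)
def pathBits : Nat → Int → Int → Int → List Int
  | 0, _, _, _ => []   -- unreachable with fuel = (right-left).toNat + 1
  | fuel + 1, left, right, target =>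
    if left = right then []
    else if target ≤ PySem.Int.floordiv (left + right) 2 then
      0 :: pathBits fuel left (PySem.Int.floordiv (left + right) 2) target
    else
      1 :: pathBits fuel (PySem.Int.floordiv (left + right) 2 + 1) right target

-- phase 2 of Source B: the for-loop folding bits onto the index
def find_alt (index : Int) (left : Int) (right : Int) (target : Int) : Int :=
  if target < left ∨ right < target then 0
  else (pathBits ((right - left).toNat + 1) left right target).foldl
    (fun i b => i * 2 + b) index

-- ===== PRECONDITION & SPEC =====
-- On inputs with a negative start index and a non-degenerate interval containing the target,
-- A's max(l,r) swallows the negative descended leaf index and returns 0, while B returns that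
-- leaf index, which is the value the descent is meant to compute.
def D_find (index : Int) (left : Int) (right : Int) (target : Int) : Prop :=
  index < 0 ∧ left < right ∧ left ≤ target ∧ target ≤ right
instance (index : Int) (left : Int) (right : Int) (target : Int) : Decidable (D_find index left right target) := by unfold D_find; infer_instance

def Spec_find (index : Int) (left : Int) (right : Int) (target : Int) (out : Int) : Prop :=
  ¬ D_find index left right target → out = find_alt index left right target
instance (index : Int) (left : Int) (right : Int) (target : Int) (out : Int) : Decidable (Spec_find index left right target out) := by unfold Spec_find; infer_instance

def pvDiffWitness_find : Int × Int × Int × Int := (-1, 0, 1, 0)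
def pvDiffWitnessOut_find : Int × Int := (0, -2)

-- ===== CLAIM (what is proved, stated in full; the proofs are below) =====
def Claim_unchanged_find : Prop := ∀ (index : Int) (left : Int) (right : Int) (target : Int), Dom_find index left right target → Spec_find index left right target (find index left right target)
def Claim_changed_find : Prop := Dom_find (pvDiffWitness_find.1) (pvDiffWitness_find.2.1) (pvDiffWitness_find.2.2.1) (pvDiffWitness_find.2.2.2) ∧ D_find (pvDiffWitness_find.1) (pvDiffWitness_find.2.1) (pvDiffWitness_find.2.2.1) (pvDiffWitness_find.2.2.2) ∧ find (pvDiffWitness_find.1) (pvDiffWitness_find.2.1) (pvDiffWitness_find.2.2.1) (pvDiffWitness_find.2.2.2) = pvDiffWitnessOut_find.1 ∧ find_alt (pvDiffWitness_find.1) (pvDiffWitness_find.2.1) (pvDiffWitness_find.2.2.1) (pvDiffWitness_find.2.2.2) = pvDiffWitnessOut_find.2 ∧ pvDiffWitnessOut_find.1 ≠ pvDiffWitnessOut_find.2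
def Claim_exact_find : Prop := ∀ (index : Int) (left : Int) (right : Int) (target : Int), Dom_find index left right target → D_find index left right target → find index left right target ≠ find_alt index left right target

-- ===== LEMMAS AND PROOFS =====

-- bounds of the floor midpoint
theorem mid_bounds {l r : Int} (h : l < r) :
    l ≤ PySem.Int.floordiv (l + r) 2 ∧ PySem.Int.floordiv (l + r) 2 < r := by
  have h1 := PySem.Int.floordiv_two_mid_bounds (lo := l) (hi := r) (by omega)
  have h2 : PySem.Int.floordiv (l + r) 2 < r := by
    rw [PySem.Int.floordiv_lt_iff_lt_mul (by omega)]; omega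
  exact ⟨h1.1, h2⟩

-- out-of-range target: A's recursion returns 0 at any fuel
theorem findGo_out (fuel : Nat) (index left right target : Int)
    (h : target < left ∨ right < target) : findGo fuel index left right target = 0 := by
  cases fuel with
  | zero => rfl
  | succ n => rw [findGo]; rw [if_pos h]

-- a negative start index keeps every value of A's recursion nonpositive
theorem findGo_nonpos (fuel : Nat) (index left right target : Int) (h : index < 0) :
    findGo fuel index left right target ≤ 0 := by
  induction fuel generalizing index left right with
  | zero => simp [findGo]
  | succ n ih =>
    rw [findGo]
    split
    · omega
    · split
      · omega
      · have h1 := ih (index * 2) left (PySem.Int.floordiv (left + right) 2) (by omega)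
        have h2 := ih (index * 2 + 1) (PySem.Int.floordiv (left + right) 2 + 1) right (by omega)
        simp only []
        omega

-- every path bit is 0 or 1
theorem pathBits_mem (fuel : Nat) (left right target : Int) :
    ∀ b ∈ pathBits fuel left right target, b = 0 ∨ b = 1 := by
  induction fuel generalizing left right with
  | zero => simp [pathBits]
  | succ n ih =>
    intro b hb
    rw [pathBits] at hb
    split at hb
    · simp at hb
    · split at hb <;> rcases List.mem_cons.mp hb with h | h <;>
        first | (left; omega) | (right; omega) | exact ih _ _ b h

-- folding 0/1 bits keeps a nonnegative index nonnegative
theorem foldl_bits_nonneg (bits : List Int) (index : Int)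
    (hb : ∀ b ∈ bits, b = 0 ∨ b = 1) (h : 0 ≤ index) :
    0 ≤ bits.foldl (fun i b => i * 2 + b) index := by
  induction bits generalizing index with
  | nil => simpa using h
  | cons b bs ih =>
    have hb0 := hb b (List.mem_cons_self ..)
    rw [List.foldl_cons]
    exact ih (index * 2 + b) (fun x hx => hb x (List.mem_cons_of_mem _ hx)) (by omega)

-- folding 0/1 bits keeps a negative index negative
theorem foldl_bits_neg (bits : List Int) (index : Int)
    (hb : ∀ b ∈ bits, b = 0 ∨ b = 1) (h : index < 0) :
    bits.foldl (fun i b => i * 2 + b) index < 0 := by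
  induction bits generalizing index with
  | nil => simpa using h
  | cons b bs ih =>
    have hb0 := hb b (List.mem_cons_self ..)
    rw [List.foldl_cons]
    exact ih (index * 2 + b) (fun x hx => hb x (List.mem_cons_of_mem _ hx)) (by omega)

-- main agreement lemma: with enough fuel, an in-range target and a nonnegative index,
-- A's recursion equals the fold of B's bit path
theorem findGo_eq_foldl_pathBits (fuel : Nat) (index left right target : Int)
    (hf : (right - left).toNat < fuel) (hi : 0 ≤ index)
    (hl : left ≤ target) (hr : target ≤ right) :
    findGo fuel index left right target
      = (pathBits fuel left right target).foldl (fun i b => i * 2 + b) index := by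
  induction fuel generalizing index left right with
  | zero => omega
  | succ n ih =>
    rw [findGo, pathBits]
    by_cases heq : left = right
    · simp only [if_neg (by omega : ¬ (target < left ∨ right < target)),
        if_pos (by omega : left = right ∧ right = target), if_pos heq, List.foldl_nil]
    · have hlt : left < right := by omega
      obtain ⟨hm1, hm2⟩ := mid_bounds hlt
      simp only [if_neg (by omega : ¬ (target < left ∨ right < target)),
        if_neg (by omega : ¬ (left = right ∧ right = target)), if_neg heq]
      by_cases ht : target ≤ PySem.Int.floordiv (left + right) 2
      · rw [if_pos ht,
          findGo_out n (index * 2 + 1) (PySem.Int.floordiv (left + right) 2 + 1) right target (by omega)]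
        have heqL := ih (index * 2) left (PySem.Int.floordiv (left + right) 2)
          (by omega) (by omega) hl ht
        have hnn := foldl_bits_nonneg (pathBits n left (PySem.Int.floordiv (left + right) 2) target)
          (index * 2) (pathBits_mem n _ _ _) (by omega)
        simp only [List.foldl_cons, add_zero]
        omega
      · rw [if_neg ht,
          findGo_out n (index * 2) left (PySem.Int.floordiv (left + right) 2) target (by omega)]
        have heqR := ih (index * 2 + 1) (PySem.Int.floordiv (left + right) 2 + 1) right
          (by omega) (by omega) (by omega) hr
        have hnn := foldl_bits_nonneg
          (pathBits n (PySem.Int.floordiv (left + right) 2 + 1) right target)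
          (index * 2 + 1) (pathBits_mem n _ _ _) (by omega)
        simp only [List.foldl_cons]
        omega

-- inside D_: A returns 0 (the empty branch's 0 swallows the negative descended index)
theorem find_zero_of_neg (index left right target : Int) (hi : index < 0)
    (hlr : left < right) (hl : left ≤ target) (hr : target ≤ right) :
    find index left right target = 0 := by
  rw [find, findGo]
  obtain ⟨hm1, hm2⟩ := mid_bounds hlr
  simp only [if_neg (by omega : ¬ (target < left ∨ right < target)),
    if_neg (by omega : ¬ (left = right ∧ right = target))]
  have h1 := findGo_nonpos ((right - left).toNat) (index * 2) left
    (PySem.Int.floordiv (left + right) 2) target (by omega)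
  have h2 := findGo_nonpos ((right - left).toNat) (index * 2 + 1)
    (PySem.Int.floordiv (left + right) 2 + 1) right target (by omega)
  by_cases ht : target ≤ PySem.Int.floordiv (left + right) 2
  · rw [findGo_out ((right - left).toNat) (index * 2 + 1)
      (PySem.Int.floordiv (left + right) 2 + 1) right target (by omega)]
    omega
  · rw [findGo_out ((right - left).toNat) (index * 2) left
      (PySem.Int.floordiv (left + right) 2) target (by omega)]
    omega

-- ===== VERDICT (by name: the statement is the Claim_ definition above) =====
theorem find_spec : Claim_unchanged_find := by
  intro index left right target _ hD
  unfold D_find at hD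
  by_cases hout : target < left ∨ right < target
  · rw [find, find_alt, findGo_out _ _ _ _ _ hout, if_pos hout]
  · rw [find, find_alt, if_neg hout]
    by_cases heq : left = right
    · rw [findGo, pathBits, if_neg hout,
        if_pos (by omega : left = right ∧ right = target), if_pos heq, List.foldl_nil]
    · exact findGo_eq_foldl_pathBits _ index left right target (by omega) (by omega)
        (by omega) (by omega)

theorem find_changed : Claim_changed_find := by unfold Claim_changed_find; decide

theorem find_tight : Claim_exact_find := by
  intro index left right target _ hD
  obtain ⟨hi, hlr, hl, hr⟩ := hD
  rw [find_zero_of_neg index left right target hi hlr hl hr, find_alt,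
    if_neg (by omega : ¬ (target < left ∨ right < target))]
  have := foldl_bits_neg (pathBits ((right - left).toNat + 1) left right target)
    index (pathBits_mem _ _ _ _) hi
  omega
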